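-- pv_equiv track=rewrite | github.com/JoakimStorck/urd | app/concepts.py | _question_matches_label
-- ===== SOURCE A (Python) =====
-- _VALID_ENDINGS = {
--     "",
--     "s",
--     "er",
--     "ers",
--     "erna",
--     "ernas",
--     "en",
--     "ens",
--     "et",
--     "ets",
--     "n",
--     "ns",
--     "na",
--     "nas",
--     "ar",
--     "ars",
--     "arna",
--     "arnas",
--     "or",
--     "orna",
--     "e",
-- }
--
-- def _is_inflection_of(word: str, term: str) -> bool:
--     word_lower = word.lower()
--     term_lower = term.lower()
--     if not word_lower.startswith(term_lower):
--         return False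
--     tail = word_lower[len(term_lower):]
--     return tail in _VALID_ENDINGS
--
-- def _question_matches_label(
--
--     q_tokens: list[str],
--     label_tokens: list[str],
-- ) -> bool:
--     if not label_tokens:
--         return False
--     for label_token in label_tokens:
--         if not any(_is_inflection_of(qt, label_token) for qt in q_tokens):
--             return False
--     return True
-- ===== SOURCE B (Python) =====
-- _VALID_ENDINGS = {
--     "", "s", "er", "ers", "erna", "ernas", "en", "ens", "et", "ets",
--     "n", "ns", "na", "nas", "ar", "ars", "arna", "arnas", "or", "orna", "e",
-- }
--
-- def _question_matches_label(q_tokens, label_tokens):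
--     if not label_tokens:
--         return False
--     q_set = {qt.lower() for qt in q_tokens}
--     return all(
--         any(label.lower() + e in q_set for e in _VALID_ENDINGS)
--         for label in label_tokens
--     )
-- ===== Notes on version B (the rewrite author's own statement) =====
-- stated objective: alternative
-- what changed: Inverts the matching: instead of prefix-testing every question token against each label, B builds a set of lowercased question tokens once and checks membership of each label's 21 inflected forms (label+ending), so the inner loop runs over the constant ending set instead of over q_tokens.
import Mathlib
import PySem

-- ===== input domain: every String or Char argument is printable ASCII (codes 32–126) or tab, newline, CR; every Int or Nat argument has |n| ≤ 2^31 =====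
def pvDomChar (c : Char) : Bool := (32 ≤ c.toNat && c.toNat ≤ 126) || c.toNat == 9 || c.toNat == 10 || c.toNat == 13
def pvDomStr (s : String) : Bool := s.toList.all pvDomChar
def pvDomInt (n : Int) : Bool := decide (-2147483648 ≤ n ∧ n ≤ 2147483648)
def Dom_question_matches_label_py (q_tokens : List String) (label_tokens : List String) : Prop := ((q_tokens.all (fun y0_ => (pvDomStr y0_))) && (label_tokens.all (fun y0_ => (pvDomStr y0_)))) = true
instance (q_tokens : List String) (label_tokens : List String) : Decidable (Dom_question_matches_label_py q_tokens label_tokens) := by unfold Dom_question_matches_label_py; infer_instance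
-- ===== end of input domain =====

-- B inverts the matching: a set of lowered question tokens is built once and each label's
-- 21 inflected forms (label+ending) are tested for membership, instead of prefix-testing
-- every question token against each label (objective: alternative, same cost class here).

-- _VALID_ENDINGS (module constant used by both programs), as lists of chars
def pvValidEndings : PySem.Set (List Char) :=
  PySem.Set.ofList (List.map String.toList
    ["", "s", "er", "ers", "erna", "ernas", "en", "ens", "et", "ets",
     "n", "ns", "na", "nas", "ar", "ars", "arna", "arnas", "or", "orna", "e"])

-- ===== PORT A =====
-- _is_inflection_of
def pvIsInflectionOf (word : String) (term : String) : Bool :=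
  let wordLower := PySem.Chars.lower word.toList
  let termLower := PySem.Chars.lower term.toList
  if !(PySem.Chars.startswith wordLower termLower) then false
  else
    let tail := PySem.List.slice wordLower (some (termLower.length : Int)) none
    PySem.Set.contains pvValidEndings tail

def question_matches_label_py (q_tokens : List String) (label_tokens : List String) : Bool :=
  if label_tokens = [] then false
  else label_tokens.all (fun label_token =>
    q_tokens.any (fun qt => pvIsInflectionOf qt label_token))

-- ===== PORT B =====
def question_matches_label_py_alt (q_tokens : List String) (label_tokens : List String) : Bool :=
  if label_tokens = [] then false
  else
    let q_set : PySem.Set (List Char) :=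
      PySem.Set.ofList (q_tokens.map (fun qt => PySem.Chars.lower qt.toList))
    label_tokens.all (fun label =>
      pvValidEndings.any (fun e =>
        PySem.Set.contains q_set (PySem.Chars.lower label.toList ++ e)))

-- ===== PRECONDITION & SPEC =====
def Spec_question_matches_label_py (q_tokens : List String) (label_tokens : List String) (out : Bool) : Prop := out = question_matches_label_py_alt q_tokens label_tokens
instance (q_tokens : List String) (label_tokens : List String) (out : Bool) : Decidable (Spec_question_matches_label_py q_tokens label_tokens out) := by unfold Spec_question_matches_label_py; infer_instance

-- ===== CLAIM (what is proved, stated in full; the proofs are below) =====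
def Claim_equal_question_matches_label_py : Prop := ∀ (q_tokens : List String) (label_tokens : List String), Dom_question_matches_label_py q_tokens label_tokens → Spec_question_matches_label_py q_tokens label_tokens (question_matches_label_py q_tokens label_tokens)

-- ===== LEMMAS AND PROOFS =====

-- startswith + tail-in-endings ↔ the word IS term ++ some ending
theorem pvIsInflection_iff (word term : String) :
    pvIsInflectionOf word term = true ↔
      ∃ e ∈ pvValidEndings,
        PySem.Chars.lower word.toList = PySem.Chars.lower term.toList ++ e := by
  unfold pvIsInflectionOf
  dsimp only
  rw [PySem.List.slice_from_natCast]
  by_cases h : PySem.Chars.startswith (PySem.Chars.lower word.toList) (PySem.Chars.lower term.toList) = true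
  · rw [h]
    simp only [Bool.not_true, Bool.false_eq_true, if_false, PySem.Set.contains_iff]
    constructor
    · intro hmem
      obtain ⟨t, ht⟩ := (PySem.Chars.startswith_iff _ _).mp h
      refine ⟨(PySem.Chars.lower word.toList).drop (PySem.Chars.lower term.toList).length, hmem, ?_⟩
      rw [← ht]
      simp
    · rintro ⟨e, he, hw⟩
      rw [hw]
      simpa using he
  · simp only [Bool.not_eq_true] at h
    rw [h]
    simp only [Bool.not_false, if_true, Bool.false_eq_true, false_iff]
    rintro ⟨e, he, hw⟩
    have : PySem.Chars.startswith (PySem.Chars.lower word.toList) (PySem.Chars.lower term.toList) = true :=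
      (PySem.Chars.startswith_iff _ _).mpr ⟨e, hw.symm⟩
    simp [h] at this

theorem pvInner_eq (q_tokens : List String) (label : String) :
    (q_tokens.any (fun qt => pvIsInflectionOf qt label)) =
      (pvValidEndings.any (fun e =>
        PySem.Set.contains
          (PySem.Set.ofList (q_tokens.map (fun qt => PySem.Chars.lower qt.toList)))
          (PySem.Chars.lower label.toList ++ e))) := by
  rw [Bool.eq_iff_iff]
  simp only [List.any_eq_true, pvIsInflection_iff, PySem.Set.contains_iff,
    PySem.Set.mem_ofList, List.mem_map]
  constructor
  · rintro ⟨qt, hq, e, he, hw⟩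
    exact ⟨e, he, qt, hq, hw⟩
  · rintro ⟨e, he, qt, hq, hw⟩
    exact ⟨qt, hq, e, he, hw⟩

-- ===== VERDICT (by name: the statement is the Claim_ definition above) =====
theorem question_matches_label_py_spec : Claim_equal_question_matches_label_py := by
  intro q_tokens label_tokens _
  unfold Spec_question_matches_label_py question_matches_label_py question_matches_label_py_alt
  by_cases h : label_tokens = []
  · simp [h]
  · simp only [h, if_false]
    exact congrArg label_tokens.all (funext (fun lab => pvInner_eq q_tokens lab))
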